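-- pv_equiv track=rewrite | github.com/jiminkyung/Algorithm | Programmers/Lv0/개미 군단.py | solution
-- ===== SOURCE A (Python) =====
-- def solution(hp):
--     ants = [5, 3, 1]
--     i, cnt = 0, 0
--     while hp > 0:
--         if hp < ants[i]:
--             i += 1
--         cnt += (hp // ants[i])
--         hp %= ants[i]
--     return cnt
-- ===== SOURCE B (Python) =====
-- def solution(hp):
--     if hp <= 0:
--         return 0
--     r = hp % 5
--     return hp // 5 + r // 3 + r % 3
-- ===== Notes on version B (the rewrite author's own statement) =====
-- stated objective: simpler
-- what changed: Replaces the greedy while-loop over the ant list with the closed-form hp//5 + (hp%5)//3 + (hp%5)%3 (0 for hp <= 0).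
import Mathlib
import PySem

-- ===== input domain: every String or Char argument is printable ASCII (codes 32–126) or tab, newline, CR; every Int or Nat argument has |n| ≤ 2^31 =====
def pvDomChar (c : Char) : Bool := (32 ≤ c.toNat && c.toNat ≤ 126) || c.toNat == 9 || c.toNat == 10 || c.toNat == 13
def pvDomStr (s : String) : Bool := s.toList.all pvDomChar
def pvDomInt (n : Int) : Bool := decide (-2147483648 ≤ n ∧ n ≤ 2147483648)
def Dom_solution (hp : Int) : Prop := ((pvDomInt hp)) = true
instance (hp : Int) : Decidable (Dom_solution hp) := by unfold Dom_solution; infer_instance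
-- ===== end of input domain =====

-- B replaces A's greedy while-loop over the ant list [5, 3, 1] with the closed form
-- hp//5 + (hp%5)//3 + (hp%5)%3 (0 for hp ≤ 0); objective: simpler.

-- ===== PORT A =====
-- A's while loop: state (hp, i, cnt); ants[i] is looked up with pyGet?
-- (a `none` lookup would be Python's IndexError — unreachable from solution's initial state i = 0).
-- The fuel argument is only a totality guard: hp.toNat + 4 bounds the number of iterations
-- (each iteration lowers hp or raises i, and i can rise at most three times before ants[i] = 1).
def solutionLoop : Nat → Int → Int → Int → Int
  | 0, _, _, cnt => cnt  -- fuel exhausted: unreachable from solution's initial fuel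
  | fuel + 1, hp, i, cnt =>
    if hp > 0 then
      match PySem.List.pyGet? ([5, 3, 1] : List Int) i with
      | none => cnt  -- IndexError: unreachable from i = 0
      | some a0 =>
        let i' := if hp < a0 then i + 1 else i
        match PySem.List.pyGet? ([5, 3, 1] : List Int) i' with
        | none => cnt  -- IndexError: unreachable from i = 0
        | some a => solutionLoop fuel (PySem.Int.mod hp a) i' (cnt + PySem.Int.floordiv hp a)
    else cnt

def solution (hp : Int) : Int := solutionLoop (hp.toNat + 4) hp 0 0

-- ===== PORT B =====
def solution_alt (hp : Int) : Int :=
  if hp ≤ 0 then 0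
  else
    let r := PySem.Int.mod hp 5
    PySem.Int.floordiv hp 5 + PySem.Int.floordiv r 3 + PySem.Int.mod r 3

-- ===== PRECONDITION & SPEC =====
def Spec_solution (hp : Int) (out : Int) : Prop := out = solution_alt hp
instance (hp : Int) (out : Int) : Decidable (Spec_solution hp out) := by unfold Spec_solution; infer_instance

-- ===== CLAIM (what is proved, stated in full; the proofs are below) =====
def Claim_equal_solution : Prop := ∀ (hp : Int), Dom_solution hp → Spec_solution hp (solution hp)

-- ===== LEMMAS AND PROOFS =====

lemma loopZero (fuel : Nat) (i cnt : Int) : solutionLoop (fuel + 1) 0 i cnt = cnt := by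
  simp [solutionLoop]

-- the loop at i = 1 with 0 ≤ hp < 3 adds exactly hp to cnt
lemma loop1_small (fuel : Nat) (hp cnt : Int) (h0 : 0 ≤ hp) (h3 : hp < 3) :
    solutionLoop (fuel + 2) hp 1 cnt = cnt + hp := by
  interval_cases hp
  · rw [loopZero]; ring
  · simp [solutionLoop, PySem.List.pyGet?, PySem.List.pyIdx?, PySem.Int.mod, PySem.Int.floordiv]
  · simp [solutionLoop, PySem.List.pyGet?, PySem.List.pyIdx?, PySem.Int.mod, PySem.Int.floordiv]

-- the loop at i = 0 with 0 ≤ hp < 5 adds exactly hp//3 + hp%3 to cnt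
lemma loop0_small (fuel : Nat) (hp cnt : Int) (h0 : 0 ≤ hp) (h5 : hp < 5) :
    solutionLoop (fuel + 3) hp 0 cnt = cnt + PySem.Int.floordiv hp 3 + PySem.Int.mod hp 3 := by
  interval_cases hp
  · rw [show fuel + 3 = (fuel + 2) + 1 from rfl, loopZero,
      show PySem.Int.floordiv 0 3 = 0 from by decide, show PySem.Int.mod 0 3 = 0 from by decide]
    ring
  all_goals
    simp [solutionLoop, PySem.List.pyGet?, PySem.List.pyIdx?, PySem.Int.mod, PySem.Int.floordiv,
      loop1_small]

lemma loop_step5 (fuel : Nat) (hp cnt : Int) (h : 5 ≤ hp) :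
    solutionLoop (fuel + 1) hp 0 cnt
      = solutionLoop fuel (PySem.Int.mod hp 5) 0 (cnt + PySem.Int.floordiv hp 5) := by
  have hpos : 0 < hp := by omega
  have hnlt : ¬ hp < 5 := by omega
  simp only [solutionLoop, if_pos hpos]
  norm_num [PySem.List.pyGet?, PySem.List.pyIdx?, hnlt]

theorem solution_spec : Claim_equal_solution := by
  unfold Claim_equal_solution
  intro hp _
  unfold Spec_solution solution solution_alt
  by_cases hle : hp ≤ 0
  · rw [show hp.toNat + 4 = (hp.toNat + 3) + 1 from rfl]
    simp only [solutionLoop]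
    simp [hle, not_lt.mpr hle]
  · simp only [if_neg hle]
    have hpos : 0 < hp := by omega
    have hmod5 : PySem.Int.mod hp 5 = hp % 5 := PySem.Int.mod_eq_emod_of_pos (by norm_num)
    have hfd5 : PySem.Int.floordiv hp 5 = hp / 5 := PySem.Int.floordiv_eq_ediv_of_pos (by norm_num)
    by_cases h5 : hp < 5
    · -- no 5-ant is used: hp//5 = 0 and hp%5 = hp
      rw [show hp.toNat + 4 = (hp.toNat + 1) + 3 from rfl,
        loop0_small (hp.toNat + 1) hp 0 (by omega) h5, hmod5, show hp % 5 = hp from by omega,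
        hfd5, show hp / 5 = 0 from by omega]
    · -- one iteration takes hp to hp % 5, adding hp // 5 to cnt
      rw [show hp.toNat + 4 = (hp.toNat + 3) + 1 from rfl,
        loop_step5 (hp.toNat + 3) hp 0 (not_lt.mp h5),
        loop0_small hp.toNat (PySem.Int.mod hp 5) _ (PySem.Int.mod_nonneg _ (by norm_num))
          (PySem.Int.mod_lt _ (by norm_num))]
      ring
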